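-- pv_equiv track=rewrite | github.com/wzz695990443/AutoZdns | domain/query_domain.py | _collect_pool_names
-- ===== SOURCE A (Python) =====
-- from typing import List, Dict, Any, Optional, Literal, Tuple
--
-- def _collect_pool_names(resources: List[Dict[str, Any]]) -> List[str]:
--     collected: List[str] = []
--     seen = set()
--
--     for resource in resources:
--         gpool_list = resource.get("gpool_list", [])
--         if not isinstance(gpool_list, list):
--             continue
--
--         for item in gpool_list:
--             if not isinstance(item, dict):
--                 continue
--
--             pool_name = str(item.get("gpool_name", "")).strip()
--             if pool_name == "" or pool_name in seen:
--                 continue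
--
--             seen.add(pool_name)
--             collected.append(pool_name)
--
--     return collected
-- ===== SOURCE B (Python) =====
-- def _collect_pool_names(resources):
--     # Stage 1: flatten to the stripped candidate names (duplicates kept).
--     flat = []
--     for resource in resources:
--         gpool_list = resource.get("gpool_list", [])
--         if not isinstance(gpool_list, list):
--             continue
--         for item in gpool_list:
--             if isinstance(item, dict):
--                 flat.append(str(item.get("gpool_name", "")).strip())
--     # Stage 2: repeated-filter nub — emit the head (if non-empty) and purge
--     # every later occurrence equal to it; no set/dict is maintained.
--     out = []
--     while flat:
--         head = flat[0]
--         flat = [x for x in flat[1:] if x != head]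
--         if head != "":
--             out.append(head)
--     return out
-- ===== Notes on version B (the rewrite author's own statement) =====
-- stated objective: alternative
-- what changed: Replaces A's single pass maintaining a mutable 'seen' set by flat extraction followed by a repeated-filtering nub loop (emit head, purge its later duplicates from the remaining list), i.e. selection-style dedup with no set/dict at all.
import Mathlib
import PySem

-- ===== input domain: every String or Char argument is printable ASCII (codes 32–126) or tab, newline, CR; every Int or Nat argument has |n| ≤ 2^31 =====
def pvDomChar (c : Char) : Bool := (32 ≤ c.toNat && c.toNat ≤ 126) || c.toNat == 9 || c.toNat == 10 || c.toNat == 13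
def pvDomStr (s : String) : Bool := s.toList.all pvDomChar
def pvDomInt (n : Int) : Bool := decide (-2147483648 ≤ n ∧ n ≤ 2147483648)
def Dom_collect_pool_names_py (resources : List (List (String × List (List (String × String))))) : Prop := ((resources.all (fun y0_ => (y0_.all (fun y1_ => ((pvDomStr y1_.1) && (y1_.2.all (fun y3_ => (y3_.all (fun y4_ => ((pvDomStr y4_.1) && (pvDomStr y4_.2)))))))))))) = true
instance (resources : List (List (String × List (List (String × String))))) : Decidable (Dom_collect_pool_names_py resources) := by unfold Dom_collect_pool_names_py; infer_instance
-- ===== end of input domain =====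

-- ===== PORT A =====
-- A: one pass; appends each non-empty stripped name not yet in the mutable 'seen' set.
-- (isinstance guards are identically true under the typed domain list[dict[str, list[dict[str,str]]]].)
def collect_pool_names_py (resources : List (List (String × List (List (String × String))))) : List String :=
  (resources.foldl
    (fun (st : List String × PySem.Set String) resource =>
      let gpool_list := (PySem.Dict.mk resource).getD "gpool_list" []
      gpool_list.foldl
        (fun (st : List String × PySem.Set String) item =>
          let pool_name := PySem.Str.strip ((PySem.Dict.mk item).getD "gpool_name" "")
          if pool_name == "" || PySem.Set.contains st.2 pool_name then st
          else (st.1 ++ [pool_name], PySem.Set.add st.2 pool_name))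
        st)
    ([], PySem.Set.empty)).1

-- ===== PORT B =====
-- B, stage 2: while-loop over the remaining candidates: take the head, emit it if
-- non-empty, and purge every equal later occurrence from the rest (repeated-filter nub).
def pvNubLoop (flat : List String) : List String :=
  match flat with
  | [] => []
  | head :: rest =>
    if head != "" then head :: pvNubLoop (rest.filter (fun x => x != head))
    else pvNubLoop (rest.filter (fun x => x != head))
termination_by flat.length
decreasing_by all_goals simpa using Nat.lt_succ_of_le (List.length_filter_le _ _)

-- B, stage 1: flatten to the stripped candidate names (duplicates kept), then nub.
def collect_pool_names_py_alt (resources : List (List (String × List (List (String × String))))) : List String :=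
  let flat := resources.foldl
    (fun (acc : List String) resource =>
      let gpool_list := (PySem.Dict.mk resource).getD "gpool_list" []
      acc ++ gpool_list.map (fun item =>
        PySem.Str.strip ((PySem.Dict.mk item).getD "gpool_name" "")))
    []
  pvNubLoop flat

-- ===== PRECONDITION & SPEC =====
def Spec_collect_pool_names_py (resources : List (List (String × List (List (String × String))))) (out : List String) : Prop := out = collect_pool_names_py_alt resources
instance (resources : List (List (String × List (List (String × String))))) (out : List String) : Decidable (Spec_collect_pool_names_py resources out) := by unfold Spec_collect_pool_names_py; infer_instance

-- ===== CLAIM (what is proved, stated in full; the proofs are below) =====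
def Claim_equal_collect_pool_names_py : Prop := ∀ (resources : List (List (String × List (List (String × String))))), Dom_collect_pool_names_py resources → Spec_collect_pool_names_py resources (collect_pool_names_py resources)

-- ===== LEMMAS AND PROOFS =====

-- nub without the ""-skip, for relating A's Set-fold to pvNubLoop.
def pvNubAll (xs : List String) : List String :=
  match xs with
  | [] => []
  | h :: t => h :: pvNubAll (t.filter (fun x => x != h))
termination_by xs.length
decreasing_by simpa using Nat.lt_succ_of_le (List.length_filter_le _ _)

-- A's flat loop (started from s = collected = seen) is first-occurrence dedup by Set.add.
theorem pv_loop_eq_add (ns : List String) (s : List String) :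
    ns.foldl
      (fun (st : List String × PySem.Set String) n =>
        if n == "" || PySem.Set.contains st.2 n then st
        else (st.1 ++ [n], PySem.Set.add st.2 n))
      (s, s)
    = (((ns.filter (fun n => n != "")).foldl PySem.Set.add s),
       ((ns.filter (fun n => n != "")).foldl PySem.Set.add s)) := by
  induction ns generalizing s with
  | nil => rfl
  | cons n ns ih =>
    rcases eq_or_ne n "" with he | he
    · subst he
      simpa using ih s
    · by_cases hc : n ∈ s
      · have hadd : PySem.Set.add s n = s := by simp [PySem.Set.add, hc]
        simp only [List.foldl_cons, List.filter_cons]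
        rw [if_pos (by simp [hc]), if_pos (by simp [he]), List.foldl_cons, hadd]
        simpa using ih s
      · have hadd : PySem.Set.add s n = s ++ [n] := by simp [PySem.Set.add, hc]
        simp only [List.foldl_cons, List.filter_cons]
        rw [if_neg (by simp [he, hc]), if_pos (by simp [he]), List.foldl_cons, hadd]
        simpa [hadd] using ih (s ++ [n])

-- Set.add-fold from accumulator s = s ++ nub of the elements not already in s.
theorem pv_foldl_add_eq_nubAll (t : List String) (s : List String) :
    t.foldl PySem.Set.add s = s ++ pvNubAll (t.filter (fun x => !(decide (x ∈ s)))) := by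
  induction t generalizing s with
  | nil => simp [pvNubAll]
  | cons h t ih =>
    by_cases hc : h ∈ s
    · have hadd : PySem.Set.add s h = s := by simp [PySem.Set.add, hc]
      simp only [List.foldl_cons, hadd, List.filter_cons]
      rw [if_neg (by simp [hc])]
      exact ih s
    · have hadd : PySem.Set.add s h = s ++ [h] := by simp [PySem.Set.add, hc]
      simp only [List.foldl_cons, hadd, List.filter_cons]
      rw [if_pos (by simp [hc])]
      rw [ih (s ++ [h])]
      have hfil : t.filter (fun x => !(decide (x ∈ s ++ [h])))
          = (t.filter (fun x => !(decide (x ∈ s)))).filter (fun x => x != h) := by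
        rw [List.filter_filter]
        apply List.filter_congr
        intro x _
        by_cases hx : x = h <;> by_cases hxs : x ∈ s <;> simp [hx, hxs]
      rw [hfil, pvNubAll, List.append_assoc]
      rfl
-- pvNubLoop xs = pvNubAll of the non-empty names of xs.
theorem pv_nubLoop_eq_nubAll (xs : List String) :
    pvNubLoop xs = pvNubAll (xs.filter (fun x => x != "")) := by
  induction xs using pvNubLoop.induct with
  | case1 => simp [pvNubLoop, pvNubAll]
  | case2 head rest hne ih =>
    simp only [List.unattach_filter, List.unattach_attach] at ih
    rw [pvNubLoop, if_pos hne]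
    rw [ih, List.filter_cons, if_pos hne, pvNubAll, List.filter_filter, List.filter_filter]
    congr 1
    apply congrArg
    apply List.filter_congr
    intro x _
    rw [Bool.and_comm]
  | case3 head rest hne ih =>
    have hhe : head = "" := by simpa using hne
    simp only [List.unattach_filter, List.unattach_attach] at ih
    rw [pvNubLoop, if_neg hne]
    rw [ih, List.filter_cons]
    subst hhe
    rw [if_neg (by simp), List.filter_filter]
    apply congrArg
    apply List.filter_congr
    intro x _
    by_cases hx : x = "" <;> simp [hx]

-- B's flat extraction equals the flatMap of A's per-item name computation.
theorem pv_flat_eq (resources : List (List (String × List (List (String × String))))) :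
    resources.foldl
      (fun (acc : List String) resource =>
        let gpool_list := (PySem.Dict.mk resource).getD "gpool_list" []
        acc ++ gpool_list.map (fun item =>
          PySem.Str.strip ((PySem.Dict.mk item).getD "gpool_name" "")))
      []
    = resources.flatMap (fun resource =>
        ((PySem.Dict.mk resource).getD "gpool_list" []).map (fun item =>
          PySem.Str.strip ((PySem.Dict.mk item).getD "gpool_name" ""))) := by
  rw [PySem.List.foldl_append_eq_flatMap]
  rfl

-- ===== VERDICT (by name: the statement is the Claim_ definition above) =====
theorem collect_pool_names_py_spec : Claim_equal_collect_pool_names_py := by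
  intro resources _
  unfold Spec_collect_pool_names_py collect_pool_names_py collect_pool_names_py_alt
  have key := pv_loop_eq_add
      (resources.flatMap (fun resource =>
        ((PySem.Dict.mk resource).getD "gpool_list" []).map (fun item =>
          PySem.Str.strip ((PySem.Dict.mk item).getD "gpool_name" "")))) []
  rw [List.foldl_flatMap] at key
  simp only [List.foldl_map] at key
  rw [show (PySem.Set.empty : PySem.Set String) = ([] : List String) from rfl, key]
  rw [pv_flat_eq, pv_nubLoop_eq_nubAll, pv_foldl_add_eq_nubAll]
  simp only [List.nil_append]
  congr 1
  simp
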